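-- pv_equiv track=rewrite | github.com/keras-team/keras-hub | keras_hub/src/layers/preprocessing/v2/multi_segment_packer.py | _trim_inputs_waterfall
-- ===== SOURCE A (Python) =====
-- def _trim_inputs_waterfall(max_seq_length, segments):
--     num_segments = len(segments)
--     batch_size = len(segments[0])
--     trimmed_segments = [
--         [[] for _ in range(batch_size)] for _ in range(num_segments)
--     ]
--     for b in range(batch_size):
--         remaining_budget = max_seq_length
--
--         # Check if total length is within limit
--         for s in range(num_segments):
--             seg_len = len(segments[s][b])
--             if remaining_budget <= 0:
--                 trimmed_segments[s][b] = []
--             elif seg_len <= remaining_budget: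
--                 trimmed_segments[s][b] = segments[s][b]
--                 remaining_budget -= seg_len
--             else:
--                 trimmed_segments[s][b] = segments[s][b][:remaining_budget]
--                 remaining_budget = 0
--     return trimmed_segments
-- ===== SOURCE B (Python) =====
-- def _trim_inputs_waterfall(max_seq_length, segments):
--     num_segments = len(segments)
--     batch_size = len(segments[0])
--     cols = []
--     for b in range(batch_size):
--         # flatten the whole column, truncate once, then re-split by original lengths
--         flat = [tok for seg in segments for tok in seg[b]]
--         kept = flat[:max(0, max_seq_length)]
--         col = []
--         pos = 0
--         for seg in segments:
--             n = len(seg[b])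
--             col.append(kept[pos:pos + n])
--             pos += n
--         cols.append(col)
--     return [[col[s] for col in cols] for s in range(num_segments)]
-- ===== Notes on version B (the rewrite author's own statement) =====
-- stated objective: alternative
-- what changed: Replaces A's per-segment keep/truncate decision threaded through a mutating remaining_budget with a flatten-truncate-resplit scheme: each batch column is concatenated, truncated once to max(0, max_seq_length) tokens, and re-split by the original segment lengths, with the matrix assembled by a final transpose.
import Mathlib
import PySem

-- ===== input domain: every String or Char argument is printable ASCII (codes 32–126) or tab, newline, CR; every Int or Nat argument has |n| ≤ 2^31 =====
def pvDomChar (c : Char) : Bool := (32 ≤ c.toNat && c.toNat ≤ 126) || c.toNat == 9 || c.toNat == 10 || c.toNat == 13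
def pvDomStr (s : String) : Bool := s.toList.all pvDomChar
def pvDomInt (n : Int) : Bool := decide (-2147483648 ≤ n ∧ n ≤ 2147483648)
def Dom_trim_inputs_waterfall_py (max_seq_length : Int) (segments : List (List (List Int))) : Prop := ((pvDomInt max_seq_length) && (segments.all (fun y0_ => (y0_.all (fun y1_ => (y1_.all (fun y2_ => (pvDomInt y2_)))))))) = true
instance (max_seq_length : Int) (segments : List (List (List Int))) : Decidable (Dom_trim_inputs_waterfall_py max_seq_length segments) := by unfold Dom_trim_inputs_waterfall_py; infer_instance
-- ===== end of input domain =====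

-- B replaces A's per-segment budget-threaded keep/truncate decision by flatten-truncate-resplit:
-- each batch column is concatenated, truncated once to max(0, max_seq_length) tokens, re-split by
-- the original segment lengths, and the matrix assembled by a final transpose
-- (objective: alternative algorithm, same cost).

-- ===== PORT A =====
-- literal transliteration of _trim_inputs_waterfall (Source A)
def trim_inputs_waterfall_py (max_seq_length : Int) (segments : List (List (List Int))) : List (List (List Int)) :=
  let num_segments : Int := PySem.List.len segments
  let batch_size : Int := PySem.List.len (PySem.List.pyGetD segments 0 [])
  let trimmed_segments : List (List (List Int)) :=
    (PySem.List.pyRange 0 num_segments 1).map (fun _ =>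
      (PySem.List.pyRange 0 batch_size 1).map (fun _ => ([] : List Int)))
  (PySem.List.pyRange 0 batch_size 1).foldl (fun trimmed b =>
    ((PySem.List.pyRange 0 num_segments 1).foldl
      (fun (st : List (List (List Int)) × Int) s =>
        let seg_len : Int := PySem.List.len (PySem.List.pyGetD (PySem.List.pyGetD segments s []) b [])
        if st.2 ≤ 0 then
          (PySem.List.pySetD st.1 s (PySem.List.pySetD (PySem.List.pyGetD st.1 s []) b []), st.2)
        else if seg_len ≤ st.2 then
          (PySem.List.pySetD st.1 s
            (PySem.List.pySetD (PySem.List.pyGetD st.1 s []) b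
              (PySem.List.pyGetD (PySem.List.pyGetD segments s []) b [])), st.2 - seg_len)
        else
          (PySem.List.pySetD st.1 s
            (PySem.List.pySetD (PySem.List.pyGetD st.1 s []) b
              (PySem.List.slice (PySem.List.pyGetD (PySem.List.pyGetD segments s []) b []) none (some st.2))), 0))
      (trimmed, max_seq_length)).1) trimmed_segments

-- ===== PORT B =====
-- the inner 'for seg in segments' loop of Source B: slice the truncated column back into segments,
-- carrying the running position pos
def resplitCol (kept : List Int) (b : Nat) : Nat → List (List (List Int)) → List (List Int)
  | _, [] => []
  | pos, seg :: rest =>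
      let n : Nat := (PySem.List.pyGetD seg (b : Int) []).length
      PySem.List.slice kept (some (pos : Int)) (some ((pos : Int) + (n : Int))) ::
        resplitCol kept b (pos + n) rest

-- transliteration of Source B: per batch column flatten, truncate once, re-split; then transpose
def trim_inputs_waterfall_py_alt (max_seq_length : Int) (segments : List (List (List Int))) : List (List (List Int)) :=
  let num_segments : Int := PySem.List.len segments
  let batch_size : Int := PySem.List.len (PySem.List.pyGetD segments 0 [])
  let cols : List (List (List Int)) :=
    (PySem.List.pyRange 0 batch_size 1).map (fun b =>
      let flat : List Int := segments.flatMap (fun seg => PySem.List.pyGetD seg b [])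
      let kept : List Int := PySem.List.slice flat none (some (max 0 max_seq_length))
      resplitCol kept b.toNat 0 segments)
  (PySem.List.pyRange 0 num_segments 1).map (fun s =>
    cols.map (fun col => PySem.List.pyGetD col s []))

-- ===== PRECONDITION & SPEC =====
-- Pre_ excludes exactly the inputs on which A raises IndexError: an empty segments list
-- (segments[0] fails) and a segment with fewer than len(segments[0]) batch entries.
def Pre_trim_inputs_waterfall_py (max_seq_length : Int) (segments : List (List (List Int))) : Prop :=
  segments ≠ [] ∧ ∀ row ∈ segments, (segments.headD []).length ≤ row.length
instance (max_seq_length : Int) (segments : List (List (List Int))) : Decidable (Pre_trim_inputs_waterfall_py max_seq_length segments) := by unfold Pre_trim_inputs_waterfall_py; infer_instance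

def pvWitness_trim_inputs_waterfall_py : Int × List (List (List Int)) :=
  (3, [[[1, 2], [3]], [[4], [5, 6]]])

def Spec_trim_inputs_waterfall_py (max_seq_length : Int) (segments : List (List (List Int))) (out : List (List (List Int))) : Prop := out = trim_inputs_waterfall_py_alt max_seq_length segments
instance (max_seq_length : Int) (segments : List (List (List Int))) (out : List (List (List Int))) : Decidable (Spec_trim_inputs_waterfall_py max_seq_length segments out) := by unfold Spec_trim_inputs_waterfall_py; infer_instance

-- ===== CLAIM (what is proved, stated in full; the proofs are below) =====
def Claim_equal_trim_inputs_waterfall_py : Prop := ∀ (max_seq_length : Int) (segments : List (List (List Int))), Dom_trim_inputs_waterfall_py max_seq_length segments → Pre_trim_inputs_waterfall_py max_seq_length segments → Spec_trim_inputs_waterfall_py max_seq_length segments (trim_inputs_waterfall_py max_seq_length segments)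

-- ===== LEMMAS AND PROOFS =====

-- the per-batch-column waterfall with A's threaded budget, written as a list recursion
def colA (budget : Int) : List (List Int) → List (List Int)
  | [] => []
  | x :: xs =>
    if budget ≤ 0 then [] :: colA budget xs
    else if (x.length : Int) ≤ budget then x :: colA (budget - (x.length : Int)) xs
    else x.take budget.toNat :: colA 0 xs

-- B's re-split written over the column itself, in drop/take form
def splitTake (kept : List Int) : List (List Int) → List (List Int)
  | [] => []
  | x :: xs => kept.take x.length :: splitTake (kept.drop x.length) xs

lemma colA_nonpos (budget : Int) (h : budget ≤ 0) :
    ∀ col : List (List Int), colA budget col = col.map (fun _ => []) := by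
  intro col
  induction col with
  | nil => simp [colA]
  | cons x xs ih => simp [colA, h, ih]

lemma splitTake_nil : ∀ col : List (List Int), splitTake [] col = col.map (fun _ => []) := by
  intro col
  induction col with
  | nil => simp [splitTake]
  | cons x xs ih => simp [splitTake, ih]

-- key algorithm bridge: A's threaded-budget waterfall equals truncate-then-resplit
lemma colA_eq_splitTake : ∀ (col : List (List Int)) (budget : Int),
    colA budget col = splitTake (col.flatten.take budget.toNat) col := by
  intro col
  induction col with
  | nil => intro budget; simp [colA, splitTake]
  | cons x xs ih =>
    intro budget
    by_cases h1 : budget ≤ 0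
    · have ht : budget.toNat = 0 := by omega
      rw [colA_nonpos budget h1, ht]
      simp [splitTake_nil]
    · by_cases h2 : (x.length : Int) ≤ budget
      · have htake : ((x :: xs).flatten.take budget.toNat) =
            x ++ xs.flatten.take (budget.toNat - x.length) := by
          simp only [List.flatten_cons]
          rw [List.take_append]
          congr 1
          rw [List.take_of_length_le (by omega)]
        simp only [colA, if_neg h1, if_pos h2, splitTake, htake]
        congr 1
        · rw [List.take_append_of_le_length (le_refl _), List.take_length]
        · rw [List.drop_append_of_le_length (le_refl _), List.drop_length, List.nil_append,
            ih (budget - (x.length : Int))]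
          congr 2
          omega
      · have hlen : budget.toNat ≤ x.length := by omega
        have htake : ((x :: xs).flatten.take budget.toNat) = x.take budget.toNat := by
          simp only [List.flatten_cons]
          rw [List.take_append]
          have : budget.toNat - x.length = 0 := by omega
          rw [this]
          simp
        simp only [colA, if_neg h1, if_neg h2, splitTake, htake]
        congr 1
        · rw [List.take_take]
          congr 1
          omega
        · rw [List.drop_eq_nil_of_le (by simpa using hlen), splitTake_nil,
            colA_nonpos 0 (le_refl 0)]

-- B's positional slicing loop is splitTake on the dropped prefix
lemma resplitCol_eq_splitTake (kept : List Int) (b : Nat) :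
    ∀ (segs : List (List (List Int))) (pos : Nat),
    resplitCol kept b pos segs = splitTake (kept.drop pos) (segs.map (fun r => r.getD b [])) := by
  intro segs
  induction segs with
  | nil => intro pos; simp [resplitCol, splitTake]
  | cons seg rest ih =>
    intro pos
    simp only [resplitCol, List.map_cons, splitTake, PySem.List.pyGetD_natCast]
    congr 1
    · rw [PySem.List.slice_natCast_add]
    · rw [ih (pos + (seg.getD b []).length), List.drop_drop]

lemma getD_set {α : Type} (row : List α) (b b' : Nat) (v d : α) (h : b' < row.length) :
    (row.set b v).getD b' d = if b' = b then v else row.getD b' d := by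
  have h2 : b' < (row.set b v).length := by simpa using h
  rw [List.getD_eq_getElem _ _ h2, List.getElem_set, List.getD_eq_getElem _ _ h]
  by_cases hb : b = b'
  · simp [hb]
  · simp [hb, Ne.symm hb]

-- one inner step of A's loop, for fixed batch index b, after range/index normalisation
def stepA (segments : List (List (List Int))) (b : Nat)
    (st : List (List (List Int)) × Int) (s : Nat) : List (List (List Int)) × Int :=
  let x := (segments.getD s []).getD b []
  if st.2 ≤ 0 then (st.1.set s ((st.1.getD s []).set b []), st.2)
  else if (x.length : Int) ≤ st.2 then
    (st.1.set s ((st.1.getD s []).set b x), st.2 - (x.length : Int))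
  else (st.1.set s ((st.1.getD s []).set b (x.take st.2.toNat)), 0)

lemma inner_spec (segments : List (List (List Int))) (b : Nat) :
    ∀ (n i : Nat) (M : List (List (List Int))) (budget : Int),
    i + n = segments.length → M.length = segments.length →
    (((List.range' i n).foldl (stepA segments b) (M, budget)).1.length = segments.length ∧
     ∀ s, s < segments.length →
       ((List.range' i n).foldl (stepA segments b) (M, budget)).1.getD s [] =
         if i ≤ s then
           (M.getD s []).set b
             ((colA budget ((segments.drop i).map (fun r => r.getD b []))).getD (s - i) [])
         else M.getD s []) := by
  intro n
  induction n with
  | zero =>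
    intro i M budget hi hM
    refine ⟨by simpa using hM, ?_⟩
    intro s hs
    simp only [List.range', List.foldl_nil]
    rw [if_neg (by omega)]
  | succ n ih =>
    intro i M budget hi hM
    have hilt : i < segments.length := by omega
    have hdrop : segments.drop i = segments[i] :: segments.drop (i+1) :=
      (List.getElem_cons_drop hilt).symm
    have hgetDi : segments.getD i [] = segments[i] := List.getD_eq_getElem _ _ hilt
    obtain ⟨v, budget₁, hstep, hcol⟩ :
        ∃ v budget₁, stepA segments b (M, budget) i
            = (M.set i ((M.getD i []).set b v), budget₁) ∧
          colA budget ((segments.drop i).map (fun r => r.getD b []))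
            = v :: colA budget₁ ((segments.drop (i+1)).map (fun r => r.getD b [])) := by
      rw [hdrop]
      simp only [stepA, hgetDi, List.map_cons, colA]
      split_ifs with h1 h2
      · exact ⟨[], budget, rfl, rfl⟩
      · exact ⟨segments[i].getD b [], budget - ((segments[i].getD b []).length : Int), rfl, rfl⟩
      · exact ⟨(segments[i].getD b []).take budget.toNat, 0, rfl, rfl⟩
    have hfold : (List.range' i (n+1)).foldl (stepA segments b) (M, budget)
        = (List.range' (i+1) n).foldl (stepA segments b)
            (M.set i ((M.getD i []).set b v), budget₁) := by
      rw [List.range'_succ]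
      simp only [List.foldl_cons, hstep]
    have hM₁len : (M.set i ((M.getD i []).set b v)).length = segments.length := by
      simpa using hM
    obtain ⟨ihlen, ihent⟩ := ih (i+1) (M.set i ((M.getD i []).set b v)) budget₁ (by omega) hM₁len
    refine ⟨by rw [hfold]; exact ihlen, ?_⟩
    intro s hs
    rw [hfold, ihent s hs]
    have hM₁getD : (M.set i ((M.getD i []).set b v)).getD s []
        = if s = i then (M.getD i []).set b v else M.getD s [] := by
      have := getD_set M i s ((M.getD i []).set b v) [] (by omega)
      rw [this]
    by_cases hsi : i ≤ s
    · by_cases hseq : s = i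
      · subst hseq
        rw [if_neg (by omega), if_pos (le_refl _), hM₁getD, if_pos rfl, hcol]
        simp
      · have h1 : i + 1 ≤ s := by omega
        rw [if_pos h1, if_pos hsi, hM₁getD, if_neg hseq, hcol]
        have hidx : s - i = (s - (i+1)) + 1 := by omega
        rw [hidx, List.getD_cons_succ]
    · rw [if_neg (by omega), if_neg hsi, hM₁getD, if_neg (by omega)]

lemma outer_spec (segments : List (List (List Int))) (L : Int) (batch : Nat) :
    ∀ (m j : Nat) (M : List (List (List Int))),
    j + m = batch → M.length = segments.length →
    (∀ s, s < segments.length → (M.getD s []).length = batch) →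
    (((List.range' j m).foldl
        (fun M b => ((List.range' 0 segments.length).foldl (stepA segments b) (M, L)).1) M).length
        = segments.length ∧
     ∀ s, s < segments.length →
       (((List.range' j m).foldl
          (fun M b => ((List.range' 0 segments.length).foldl (stepA segments b) (M, L)).1) M).getD s []).length = batch ∧
       ∀ b, b < batch →
         (((List.range' j m).foldl
            (fun M b => ((List.range' 0 segments.length).foldl (stepA segments b) (M, L)).1) M).getD s []).getD b [] =
           if j ≤ b then (colA L (segments.map (fun r => r.getD b []))).getD s []
           else (M.getD s []).getD b []) := by
  intro m
  induction m with
  | zero =>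
    intro j M hj hM hrows
    refine ⟨by simpa using hM, ?_⟩
    intro s hs
    refine ⟨by simpa using hrows s hs, ?_⟩
    intro b hb
    simp only [List.range', List.foldl_nil]
    rw [if_neg (by omega)]
  | succ m ih =>
    intro j M hj hM hrows
    obtain ⟨h1len, h1ent⟩ := inner_spec segments j segments.length 0 M L (by omega) hM
    have hM₁ent : ∀ s, s < segments.length →
        ((List.range' 0 segments.length).foldl (stepA segments j) (M, L)).1.getD s []
        = (M.getD s []).set j ((colA L (segments.map (fun r => r.getD j []))).getD s []) := by
      intro s hs
      have h := h1ent s hs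
      rw [if_pos (Nat.zero_le s)] at h
      simpa using h
    have hM₁rows : ∀ s, s < segments.length →
        (((List.range' 0 segments.length).foldl (stepA segments j) (M, L)).1.getD s []).length
          = batch := by
      intro s hs; rw [hM₁ent s hs]; simpa using hrows s hs
    obtain ⟨ihlen, ihent⟩ := ih (j+1)
      ((List.range' 0 segments.length).foldl (stepA segments j) (M, L)).1 (by omega) h1len hM₁rows
    have hfold : (List.range' j (m+1)).foldl
          (fun M b => ((List.range' 0 segments.length).foldl (stepA segments b) (M, L)).1) M
        = (List.range' (j+1) m).foldl
          (fun M b => ((List.range' 0 segments.length).foldl (stepA segments b) (M, L)).1)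
          ((List.range' 0 segments.length).foldl (stepA segments j) (M, L)).1 := by
      rw [List.range'_succ]
      simp only [List.foldl_cons]
    refine ⟨by rw [hfold]; exact ihlen, ?_⟩
    intro s hs
    obtain ⟨ihrow, ihentb⟩ := ihent s hs
    refine ⟨by rw [hfold]; exact ihrow, ?_⟩
    intro b hb
    rw [hfold, ihentb b hb]
    by_cases hjb : j + 1 ≤ b
    · rw [if_pos hjb, if_pos (by omega)]
    · rw [if_neg hjb, hM₁ent s hs,
        getD_set (M.getD s []) j b _ [] (by rw [hrows s hs]; omega)]
      by_cases hbj : b = j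
      · subst hbj
        rw [if_pos rfl, if_pos (by omega)]
      · rw [if_neg hbj, if_neg (by omega)]

lemma portA_eq (L : Int) (segs : List (List (List Int))) :
    trim_inputs_waterfall_py L segs =
      (List.range' 0 (segs.getD 0 []).length).foldl
        (fun M b => ((List.range' 0 segs.length).foldl (stepA segs b) (M, L)).1)
        (List.replicate segs.length (List.replicate (segs.getD 0 []).length ([] : List Int))) := by
  unfold trim_inputs_waterfall_py
  simp only [PySem.List.len_eq, PySem.List.pyGetD_zero, PySem.List.pyRange_zero_nat,
    List.foldl_map, List.map_map, PySem.List.pyGetD_natCast, PySem.List.pySetD_natCast,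
    List.range_eq_range', Function.comp_def, List.map_const', List.length_range']
  congr 1
  funext M b
  have hstep : ∀ (st : List (List (List Int)) × Int) (s : Nat),
      (if st.2 ≤ 0 then (st.1.set s ((st.1.getD s []).set b []), st.2)
       else if ((((segs.getD s []).getD b []).length : Int)) ≤ st.2 then
         (st.1.set s ((st.1.getD s []).set b ((segs.getD s []).getD b [])),
           st.2 - (((segs.getD s []).getD b []).length : Int))
       else
         (st.1.set s ((st.1.getD s []).set b
           (PySem.List.slice ((segs.getD s []).getD b []) none (some st.2))), 0))
      = stepA segs b st s := by
    intro st s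
    simp only [stepA]
    split_ifs with h1 h2
    · rfl
    · rfl
    · rw [PySem.List.slice_to _ (by omega)]
  simp only [hstep]

-- B's column b (as built by its port) is A's column waterfall
lemma portB_col (L : Int) (segs : List (List (List Int))) (b : Nat) :
    resplitCol (PySem.List.slice (segs.flatMap (fun seg => seg.getD b []))
        none (some (max 0 L))) b 0 segs
      = colA L (segs.map (fun r => r.getD b [])) := by
  have hflat : segs.flatMap (fun seg => seg.getD b [])
      = (segs.map (fun r => r.getD b [])).flatten := by
    simp [List.flatMap_def]
  rw [hflat, PySem.List.slice_to _ (by positivity), resplitCol_eq_splitTake, List.drop_zero,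
    colA_eq_splitTake]
  congr 2
  omega

-- ===== VERDICT (by name: the statement is the Claim_ definition above) =====
theorem trim_inputs_waterfall_py_spec : Claim_equal_trim_inputs_waterfall_py := by
  unfold Claim_equal_trim_inputs_waterfall_py
  intro L segs _ hpre
  obtain ⟨hne, _⟩ := hpre
  unfold Spec_trim_inputs_waterfall_py
  have halt : trim_inputs_waterfall_py_alt L segs
      = (List.range segs.length).map (fun s =>
          ((List.range (segs.getD 0 []).length).map (fun b =>
            colA L (segs.map (fun r => r.getD b [])))).map (fun col => col.getD s [])) := by
    unfold trim_inputs_waterfall_py_alt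
    simp only [PySem.List.len_eq, PySem.List.pyGetD_zero, PySem.List.pyRange_zero_nat,
      List.map_map, Function.comp_def, PySem.List.pyGetD_natCast, Int.toNat_natCast]
    congr 1
    funext s
    congr 1
    funext b
    exact congrArg (fun col => col.getD s []) (portB_col L segs b)
  rw [portA_eq, halt]
  obtain ⟨Alen, Aent⟩ := outer_spec segs L (segs.getD 0 []).length (segs.getD 0 []).length 0
    (List.replicate segs.length (List.replicate (segs.getD 0 []).length []))
    (by omega) (by simp)
    (by intro s hs; rw [List.getD_eq_getElem _ _ (by simpa using hs)]; simp)
  apply List.ext_getElem (by rw [Alen]; simp)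
  intro s hs1 hs2
  have hs : s < segs.length := by rwa [Alen] at hs1
  obtain ⟨Arow, Aentb⟩ := Aent s hs
  rw [← List.getD_eq_getElem _ [] hs1, List.getElem_map, List.getElem_range]
  apply List.ext_getElem (by rw [Arow]; simp)
  intro b hb1 hb2
  have hb : b < (segs.getD 0 []).length := by rwa [Arow] at hb1
  rw [← List.getD_eq_getElem _ [] hb1, Aentb b hb, if_pos (Nat.zero_le b),
    List.getElem_map, List.getElem_map, List.getElem_range]
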